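-- pv_equiv track=rewrite | github.com/furubayashim/foobar-challange | the_cake_is_not_a_lie.py | solution
-- ===== SOURCE A (Python) =====
-- def solution(s):
--     # given a non-empty string less than 200 char
--     # retun max number of equal parts
--
--     # get length of s
--     l = len(s)
--
--     # exit if s >= 200
--     if (l == 0) or (l >= 200): return
--
--     # when cake cannot be devided = 1
--     potential_solution = [1]
--
--     # find number that can divide s
--     div_list = [i for i in range(1,l) if (l%i == 0)]
--
--     for i in div_list:
--         # first few char
--         repeat_s = s[:i]
--         # how many times does this appear
--         r = int(l/i)
--         # make full string by repeat_s
--         temp_s = repeat_s * r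
--         # see if it matches the input
--         if temp_s == s:
--             potential_solution.append(r)
--
--     return max(potential_solution)
-- ===== SOURCE B (Python) =====
-- def solution(s):
--     # Early-exit scan: the first i that divides len(s) and is a period
--     # (checked by the shift comparison s[i:] == s[:-i], no string rebuilding)
--     # gives the maximal number of equal parts directly.
--     l = len(s)
--     if l == 0 or l >= 200:
--         return None
--     for i in range(1, l):
--         if l % i == 0 and s[i:] == s[:l - i]:
--             return l // i
--     return 1
-- ===== Notes on version B (the rewrite author's own statement) =====
-- stated objective: alternative
-- what changed: Replaces A's collect-all strategy (build each candidate by string repetition, append every matching count, take max at the end) with an early-exit increasing scan that tests each candidate period by a single shift comparison s[i:] == s[:l-i] and returns l//i at the first hit, relying on the facts that a divisor i is a period iff the shifted suffix equals the prefix and that the smallest matching divisor yields the maximal count.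
import Mathlib
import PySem

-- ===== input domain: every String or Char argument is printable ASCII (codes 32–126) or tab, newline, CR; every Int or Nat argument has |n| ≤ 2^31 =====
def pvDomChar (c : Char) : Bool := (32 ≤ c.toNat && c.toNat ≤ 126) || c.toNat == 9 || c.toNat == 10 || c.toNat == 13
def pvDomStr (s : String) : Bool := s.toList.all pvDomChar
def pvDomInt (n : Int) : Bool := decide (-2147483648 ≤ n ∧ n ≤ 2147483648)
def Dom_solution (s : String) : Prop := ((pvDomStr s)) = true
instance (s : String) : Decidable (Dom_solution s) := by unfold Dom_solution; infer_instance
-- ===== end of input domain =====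

-- B replaces A's collect-all-candidates-then-max loop (which rebuilds each candidate by
-- string repetition) with an early-exit increasing scan testing each divisor by a single
-- shift comparison s[i:] == s[:l-i]; objective: alternative algorithm, same exact values.


-- ===== PORT A =====
def solution (s : String) : Option Int :=
  let l : Int := PySem.Str.len s
  if l == 0 || 200 ≤ l then none
  else
    let div_list : List Int := (PySem.List.pyRange 1 l).filter (fun i => PySem.Int.mod l i == 0)
    let potential_solution : List Int :=
      div_list.foldl (fun acc i =>
        let repeat_s := PySem.Str.slice s none (some i)
        -- int(l/i): float division then truncation; truncdiv is exact for |l|,|i| < 2^53 (here l < 200)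
        let r : Int := PySem.Int.truncdiv l i
        let temp_s := String.ofList (PySem.List.pyRepeat repeat_s.toList r)
        if temp_s == s then acc ++ [r] else acc) [1]
    -- max(potential_solution): the list always contains 1, so max? is some
    PySem.List.max? potential_solution (fun x => x)

-- ===== PORT B =====
-- B's for-loop with early return, as structural recursion over the range list
def solutionAltLoop (s : String) (l : Int) : List Int → Int
  | [] => 1
  | i :: rest =>
    if PySem.Int.mod l i == 0 &&
        PySem.Str.slice s (some i) none == PySem.Str.slice s none (some (l - i)) then
      PySem.Int.floordiv l i
    else solutionAltLoop s l rest

def solution_alt (s : String) : Option Int :=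
  let l : Int := PySem.Str.len s
  if l == 0 || 200 ≤ l then none
  else some (solutionAltLoop s l (PySem.List.pyRange 1 l))

-- ===== PRECONDITION & SPEC =====
def Spec_solution (s : String) (out : Option Int) : Prop := out = solution_alt s
instance (s : String) (out : Option Int) : Decidable (Spec_solution s out) := by unfold Spec_solution; infer_instance

-- ===== CLAIM (what is proved, stated in full; the proofs are below) =====
def Claim_equal_solution : Prop := ∀ (s : String), Dom_solution s → Spec_solution s (solution s)

-- ===== LEMMAS AND PROOFS =====

theorem period_repl : ∀ (k j : Nat) (cs : List Char), 0 < j → cs.length = k * j →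
    cs.drop j = cs.take (cs.length - j) →
    (List.replicate k (cs.take j)).flatten = cs := by
  intro k
  induction k with
  | zero => intro j cs hj hlen _; simp at hlen; simp [hlen]
  | succ k ih =>
    intro j cs hj hlen hshift
    have hjle : j ≤ cs.length := by nlinarith
    have hlen' : (cs.drop j).length = k * j := by simp [hlen]; ring_nf; omega
    have hshift' : (cs.drop j).drop j = (cs.drop j).take ((cs.drop j).length - j) := by
      conv_lhs => rw [hshift]
      rw [List.drop_take]
      congr 1
      simp
    have hrep' := ih j (cs.drop j) hj hlen' hshift'
    have htake : List.replicate k ((cs.drop j).take j) = List.replicate k (cs.take j) := by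
      cases k with
      | zero => rfl
      | succ m =>
        have h2 : 2 * j ≤ cs.length := by nlinarith
        have : (cs.drop j).take j = cs.take j := by
          conv_lhs => rw [hshift]
          rw [List.take_take]
          congr 1
          omega
        rw [this]
    rw [List.replicate_succ, List.flatten_cons]
    rw [htake] at hrep'
    rw [hrep']
    exact List.take_append_drop j cs

theorem repl_period' (j : Nat) (cs : List Char) (k' : Nat)
    (hlen : cs.length = (k' + 1) * j)
    (hrep : (List.replicate (k' + 1) (cs.take j)).flatten = cs) :
    cs.drop j = cs.take (cs.length - j) := by
  have hjle : j ≤ cs.length := by nlinarith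
  have htl : (cs.take j).length = j := by simp [hjle]
  have hflat : (List.replicate k' (cs.take j)).flatten.length = cs.length - j := by
    simp [htl, hlen]; ring_nf; omega
  have hsplit : cs = (List.replicate k' (cs.take j)).flatten ++ cs.take j := by
    conv_lhs => rw [← hrep, List.replicate_succ', List.flatten_append]
    simp
  have h1 : cs.drop j = (List.replicate k' (cs.take j)).flatten := by
    conv_lhs => rw [← hrep, List.replicate_succ, List.flatten_cons]
    exact List.drop_left' htl
  have h2 : ((List.replicate k' (cs.take j)).flatten ++ cs.take j).take (cs.length - j)
      = (List.replicate k' (cs.take j)).flatten := List.take_left' hflat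
  rw [h1, ← h2]
  congr 1
  exact hsplit.symm

theorem altLoop_eq_filter (s : String) (l : Int) (R : List Int) :
    solutionAltLoop s l R =
      (match R.filter (fun i => PySem.Int.mod l i == 0 &&
          (PySem.Str.slice s (some i) none == PySem.Str.slice s none (some (l - i)))) with
        | [] => 1
        | i :: _ => PySem.Int.floordiv l i) := by
  induction R with
  | nil => rfl
  | cons i rest ih =>
    by_cases h : (PySem.Int.mod l i == 0 &&
        (PySem.Str.slice s (some i) none == PySem.Str.slice s none (some (l - i)))) = true
    · simp [solutionAltLoop, h]
    · simp only [solutionAltLoop, List.filter_cons, h]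
      simp at h
      simp [ih]

theorem foldl_max_of_le (t : List Int) (a : Int) (h : ∀ y ∈ t, y ≤ a) :
    t.foldl max a = a := by
  rcases PySem.List.foldl_max_mem t a with h1 | h1
  · exact h1
  · exact le_antisymm (h _ h1) (PySem.List.le_foldl_max t a).1

theorem ediv_antitone (a b c : Int) (h0 : 0 ≤ a) (h1 : 0 < b) (h2 : b ≤ c) : a / c ≤ a / b := by
  have hc : 0 < c := lt_of_lt_of_le h1 h2
  rcases Int.le.dest h0 with ⟨n, rfl⟩
  rcases Int.le.dest h1.le with ⟨p, hp⟩
  rcases Int.le.dest hc.le with ⟨q, hq⟩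
  simp at hp hq
  subst hp hq
  norm_cast
  exact Nat.div_le_div_left (by exact_mod_cast h2) (by exact_mod_cast h1)

theorem max_head (l : Int) (M : List Int)
    (hM : ∀ i ∈ M, 0 < i ∧ i < l)
    (hs : M.Pairwise (· ≤ ·)) :
    (PySem.List.max? (1 :: M.map (fun i => PySem.Int.floordiv l i)) (fun x => x)) =
      some (match M with | [] => 1 | i :: _ => PySem.Int.floordiv l i) := by
  rw [PySem.List.max?_id_cons]
  cases M with
  | nil => rfl
  | cons i t =>
    obtain ⟨hi, hilt⟩ := hM i (by simp)
    have hl : 0 < l := lt_trans hi hilt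
    have hfi : 1 ≤ PySem.Int.floordiv l i := by
      rw [PySem.Int.floordiv_eq_ediv_of_pos hi]
      exact (Int.le_ediv_iff_mul_le hi).mpr (by omega)
    have hle : ∀ y ∈ (t.map (fun i => PySem.Int.floordiv l i)), y ≤ PySem.Int.floordiv l i := by
      intro y hy
      obtain ⟨i', hi', rfl⟩ := List.mem_map.mp hy
      obtain ⟨hi'0, _⟩ := hM i' (by simp [hi'])
      have hii' : i ≤ i' := (List.pairwise_cons.mp hs).1 i' hi'
      rw [PySem.Int.floordiv_eq_ediv_of_pos hi, PySem.Int.floordiv_eq_ediv_of_pos hi'0]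
      exact ediv_antitone l i i' hl.le hi hii'
    simp only [List.map_cons, List.foldl_cons]
    rw [max_eq_right hfi]
    rw [foldl_max_of_le _ _ hle]

theorem pred_eq (s : String) (i : Int)
    (h1 : 1 ≤ i) (h2 : i < PySem.Str.len s) :
    ((String.ofList (PySem.List.pyRepeat (PySem.Str.slice s none (some i)).toList
          (PySem.Int.truncdiv (PySem.Str.len s) i)) == s)
      && (PySem.Int.mod (PySem.Str.len s) i == 0))
    = ((PySem.Int.mod (PySem.Str.len s) i == 0) &&
      (PySem.Str.slice s (some i) none == PySem.Str.slice s none (some (PySem.Str.len s - i)))) := by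
  by_cases hdiv : (PySem.Int.mod (PySem.Str.len s) i == 0) = true
  · simp only [hdiv, Bool.and_true, Bool.true_and]
    have hlen : PySem.Str.len s = (s.toList.length : Int) := PySem.Str.len_eq s
    obtain ⟨j, rfl⟩ : ∃ j : Nat, i = (j : Int) := ⟨i.toNat, by omega⟩
    have hj0 : 0 < j := by exact_mod_cast h1
    have hjn : j < s.toList.length := by rw [hlen] at h2; exact_mod_cast h2
    have hdvd : j ∣ s.toList.length := by
      rw [hlen] at hdiv
      have h := (PySem.Int.mod_eq_zero_iff_dvd _ _).mp (beq_iff_eq.mp hdiv)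
      exact_mod_cast h
    have hsliceA : (PySem.Str.slice s none (some (j:Int))).toList = s.toList.take j := by
      rw [PySem.Str.toList_slice, PySem.Chars.slice_eq_listSlice, PySem.List.slice_to_natCast]
    have htr : PySem.Int.truncdiv (PySem.Str.len s) (j:Int) = ((s.toList.length / j : Nat) : Int) := by
      rw [hlen]; rfl
    have hrepA : PySem.List.pyRepeat (s.toList.take j) ((s.toList.length / j : Nat) : Int)
        = (List.replicate (s.toList.length / j) (s.toList.take j)).flatten := by
      have ht : ((s.toList.length / j : Nat) : Int).toNat = s.toList.length / j := Int.toNat_natCast _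
      simp only [PySem.List.pyRepeat, ht]
    have hsliceB1 : (PySem.Str.slice s (some (j:Int)) none).toList = s.toList.drop j := by
      rw [PySem.Str.toList_slice, PySem.Chars.slice_eq_listSlice, PySem.List.slice_from_natCast]
    have hsliceB2 : (PySem.Str.slice s none (some (PySem.Str.len s - (j:Int)))).toList
        = s.toList.take (s.toList.length - j) := by
      have hc : PySem.Str.len s - (j:Int) = ((s.toList.length - j : Nat) : Int) := by rw [hlen]; omega
      rw [hc, PySem.Str.toList_slice, PySem.Chars.slice_eq_listSlice, PySem.List.slice_to_natCast]
    rw [Bool.eq_iff_iff]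
    simp only [beq_iff_eq, String.ext_iff, String.toList_ofList, hsliceA, htr, hrepA,
      hsliceB1, hsliceB2]
    constructor
    · intro hrep
      have hk1 : 0 < s.toList.length / j := Nat.div_pos (le_of_lt hjn) hj0
      obtain ⟨k', hk'⟩ : ∃ k', s.toList.length / j = k' + 1 := ⟨s.toList.length / j - 1, by omega⟩
      exact repl_period' j s.toList k' (by rw [← hk']; exact (Nat.div_mul_cancel hdvd).symm)
        (by rw [← hk']; exact hrep)
    · intro hshift
      exact period_repl (s.toList.length / j) j s.toList hj0 (Nat.div_mul_cancel hdvd).symm hshift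
  · have hf : (PySem.Int.mod (PySem.Str.len s) i == 0) = false := by
      simpa using hdiv
    rw [hf]
    simp

theorem trunc_eq_floor (a b : Int) (h : 0 ≤ a) (hb : 0 < b) :
    PySem.Int.truncdiv a b = PySem.Int.floordiv a b := by
  show a.tdiv b = a.fdiv b
  rw [Int.tdiv_eq_ediv_of_nonneg h, Int.fdiv_eq_ediv_of_nonneg a hb.le]

theorem pyRange_pairwise_le (l : Int) : (PySem.List.pyRange 1 l).Pairwise (· ≤ ·) := by
  rw [PySem.List.pyRange_of_pos 1 l Int.one_pos]
  rw [List.pairwise_map]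
  apply List.Pairwise.imp ?_ List.pairwise_lt_range
  intro a b hab
  simp
  omega

theorem solution_eq_alt (s : String) : solution s = solution_alt s := by
  unfold solution solution_alt
  by_cases hg : (PySem.Str.len s == 0 || decide (200 ≤ PySem.Str.len s)) = true
  · simp only [hg, if_true]
  · simp only [Bool.not_eq_true] at hg
    simp only [hg, Bool.false_eq_true, if_false]
    rw [PySem.List.foldl_append_if
      (p := fun i => String.ofList (PySem.List.pyRepeat (PySem.Str.slice s none (some i)).toList
          (PySem.Int.truncdiv (PySem.Str.len s) i)) == s)
      (f := fun i => PySem.Int.truncdiv (PySem.Str.len s) i)]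
    rw [List.filter_filter]
    have hmem : ∀ i ∈ PySem.List.pyRange 1 (PySem.Str.len s), 1 ≤ i ∧ i < PySem.Str.len s :=
      fun i hi => PySem.List.mem_pyRange_one.mp hi
    rw [List.filter_congr (fun i hi => pred_eq s i (hmem i hi).1 (hmem i hi).2)]
    rw [altLoop_eq_filter]
    have hMsub : ∀ i ∈ (PySem.List.pyRange 1 (PySem.Str.len s)).filter (fun i =>
        PySem.Int.mod (PySem.Str.len s) i == 0 &&
        (PySem.Str.slice s (some i) none == PySem.Str.slice s none (some (PySem.Str.len s - i)))),
        0 < i ∧ i < PySem.Str.len s := by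
      intro i hi
      have := hmem i (List.mem_of_mem_filter hi)
      omega
    have hmapf : ((PySem.List.pyRange 1 (PySem.Str.len s)).filter (fun i =>
        PySem.Int.mod (PySem.Str.len s) i == 0 &&
        (PySem.Str.slice s (some i) none == PySem.Str.slice s none (some (PySem.Str.len s - i))))).map
          (fun i => PySem.Int.truncdiv (PySem.Str.len s) i)
        = ((PySem.List.pyRange 1 (PySem.Str.len s)).filter (fun i =>
        PySem.Int.mod (PySem.Str.len s) i == 0 &&
        (PySem.Str.slice s (some i) none == PySem.Str.slice s none (some (PySem.Str.len s - i))))).map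
          (fun i => PySem.Int.floordiv (PySem.Str.len s) i) := by
      apply List.map_congr_left
      intro i hi
      obtain ⟨h0, hlt⟩ := hMsub i hi
      exact trunc_eq_floor _ _ (by omega) h0
    rw [List.singleton_append, hmapf]
    rw [max_head (PySem.Str.len s) _ hMsub ((pyRange_pairwise_le (PySem.Str.len s)).filter _)]


-- ===== VERDICT (by name: the statement is the Claim_ definition above) =====
theorem solution_spec : Claim_equal_solution := by
  intro s _
  unfold Spec_solution
  exact solution_eq_alt s
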